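-- pv_equiv track=rewrite | github.com/pengyuhou/git_test1 | leetcode/1111. 有效括号的嵌套深度.py | maxDepthAfterSplit
-- ===== SOURCE A (Python) =====
-- def maxDepthAfterSplit(seq):
--     """
--     :type seq: str
--     :rtype: List[int]
--     """
--
--     ans = []
--     index = 0
--     for s in seq:
--         if s == '(':
--             index += 1
--             ans.append(index % 2)
--         else:
--             ans.append(index % 2)
--             index -= 1
--     return ans
-- ===== SOURCE B (Python) =====
-- def maxDepthAfterSplit(seq):
--     # position-indexed closed form: depth parity before position i is i % 2
--     return [(i + 1) % 2 if c == '(' else i % 2 for i, c in enumerate(seq)]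
-- ===== Notes on version B (the rewrite author's own statement) =====
-- stated objective: simpler
-- what changed: Replaced the stateful depth-counter loop with a stateless list comprehension computing each answer from the character's position parity ((i+1)%2 for '(', i%2 otherwise), using the invariant that the running counter always has parity i%2 before position i.
import Mathlib
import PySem

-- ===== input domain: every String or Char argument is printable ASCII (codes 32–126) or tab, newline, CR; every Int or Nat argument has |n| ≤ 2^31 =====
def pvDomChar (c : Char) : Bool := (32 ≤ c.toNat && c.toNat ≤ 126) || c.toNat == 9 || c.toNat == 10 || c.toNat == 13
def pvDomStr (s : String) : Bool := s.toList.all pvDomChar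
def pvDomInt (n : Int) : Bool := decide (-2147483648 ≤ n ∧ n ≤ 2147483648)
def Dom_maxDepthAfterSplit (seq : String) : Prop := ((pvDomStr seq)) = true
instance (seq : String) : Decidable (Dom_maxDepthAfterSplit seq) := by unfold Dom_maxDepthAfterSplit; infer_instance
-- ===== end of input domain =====

-- B replaces A's running depth counter by a stateless per-position parity formula (objective: simpler).

-- ===== PORT A =====
-- A's for-loop over seq with state (ans, index); the append-loop is the usual structural recursion
def maxDepthAfterSplitGo : List Char → Int → List Int
  | [], _ => []
  | c :: rest, index =>
    if c = '(' then
      PySem.Int.mod (index + 1) 2 :: maxDepthAfterSplitGo rest (index + 1)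
    else
      PySem.Int.mod index 2 :: maxDepthAfterSplitGo rest (index - 1)

def maxDepthAfterSplit (seq : String) : List Int :=
  maxDepthAfterSplitGo seq.toList 0

-- ===== PORT B =====
def maxDepthAfterSplit_alt (seq : String) : List Int :=
  (PySem.List.enumerate seq.toList 0).map
    (fun p => if p.2 = '(' then PySem.Int.mod (p.1 + 1) 2 else PySem.Int.mod p.1 2)

-- ===== PRECONDITION & SPEC =====
def Spec_maxDepthAfterSplit (seq : String) (out : List Int) : Prop := out = maxDepthAfterSplit_alt seq
instance (seq : String) (out : List Int) : Decidable (Spec_maxDepthAfterSplit seq out) := by unfold Spec_maxDepthAfterSplit; infer_instance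

-- ===== CLAIM (what is proved, stated in full; the proofs are below) =====
def Claim_equal_maxDepthAfterSplit : Prop := ∀ (seq : String), Dom_maxDepthAfterSplit seq → Spec_maxDepthAfterSplit seq (maxDepthAfterSplit seq)

-- ===== LEMMAS AND PROOFS =====

-- invariant: A's counter `index` always has the same parity as B's position counter `i`
theorem maxDepthAfterSplitGo_eq_enumerate (l : List Char) :
    ∀ (index i : Int), PySem.Int.mod index 2 = PySem.Int.mod i 2 →
      maxDepthAfterSplitGo l index =
        (PySem.List.enumerate l i).map
          (fun p => if p.2 = '(' then PySem.Int.mod (p.1 + 1) 2 else PySem.Int.mod p.1 2) := by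
  induction l with
  | nil => intro index i _; simp [maxDepthAfterSplitGo, PySem.List.enumerate_nil]
  | cons c rest ih =>
    intro index i h
    rw [PySem.Int.mod_eq_emod_of_pos (by omega)] at h
    rw [PySem.Int.mod_eq_emod_of_pos (a := i) (by omega)] at h
    simp only [PySem.List.enumerate_cons, List.map_cons, maxDepthAfterSplitGo]
    by_cases hc : c = '('
    · simp only [hc, if_true]
      rw [ih (index + 1) (i + 1) (by rw [PySem.Int.mod_eq_emod_of_pos (by omega),
            PySem.Int.mod_eq_emod_of_pos (a := i + 1) (by omega)]; omega)]
      rw [PySem.Int.mod_eq_emod_of_pos (by omega),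
          PySem.Int.mod_eq_emod_of_pos (a := i + 1) (by omega)]
      exact congrArg₂ List.cons (by omega) rfl
    · simp only [if_neg hc]
      rw [ih (index - 1) (i + 1) (by rw [PySem.Int.mod_eq_emod_of_pos (by omega),
            PySem.Int.mod_eq_emod_of_pos (a := i + 1) (by omega)]; omega)]
      rw [PySem.Int.mod_eq_emod_of_pos (by omega),
          PySem.Int.mod_eq_emod_of_pos (a := i) (by omega)]
      exact congrArg₂ List.cons (by omega) rfl

-- ===== VERDICT (by name: the statement is the Claim_ definition above) =====
theorem maxDepthAfterSplit_spec : Claim_equal_maxDepthAfterSplit := by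
  intro seq _
  unfold Spec_maxDepthAfterSplit maxDepthAfterSplit maxDepthAfterSplit_alt
  exact maxDepthAfterSplitGo_eq_enumerate seq.toList 0 0 rfl
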